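-- pv_equiv track=rewrite | github.com/AutoTreeGen/TreeGen | packages/inference-engine/src/inference_engine/detectors/metric_book_ocr.py | _has_metric_book_ocr_context
-- ===== SOURCE A (Python) =====
-- from typing import Any
--
-- def _has_metric_book_ocr_context(
--     embedded_errors: list[dict[str, Any]],
--     snippets: list[dict[str, Any]],
-- ) -> bool:
--     """Return True only for metric-book OCR repair evidence.
--
--     This prevents generic duplicate/place/source errors in other trees from
--     being treated as OCR repair cases.
--     """
--     snippet_types = {str(snippet.get("type", "")).lower() for snippet in snippets}
--     has_primary_source = bool(
--         snippet_types & {"metric_book_birth_image", "metric_book_marriage", "revision_list"}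
--     )
--     has_derivative_source = bool(snippet_types & {"ocr_output_raw", "online_tree"})
--     has_ocr_error = any(error.get("type") == "ocr_error" for error in embedded_errors)
--     return has_ocr_error and has_primary_source and has_derivative_source
-- ===== SOURCE B (Python) =====
-- _CATEGORY = {
--     "metric_book_birth_image": "primary",
--     "metric_book_marriage": "primary",
--     "revision_list": "primary",
--     "ocr_output_raw": "derivative",
--     "online_tree": "derivative",
-- }
--
--
-- def _has_metric_book_ocr_context(embedded_errors, snippets):
--     """Requirement-set algorithm: classify every piece of evidence (error or
--     snippet) into a category via one lookup table, then shrink the set of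
--     unmet requirements until it is empty."""
--     need = {"ocr", "primary", "derivative"}
--     evidence = [
--         "ocr" if error.get("type") == "ocr_error" else None
--         for error in embedded_errors
--     ] + [
--         _CATEGORY.get(str(snippet.get("type", "")).lower())
--         for snippet in snippets
--     ]
--     for category in evidence:
--         need.discard(category)
--         if not need:
--             return True
--     return False
-- ===== Notes on version B (the rewrite author's own statement) =====
-- stated objective: alternative
-- what changed: Replaced the build-a-type-set-then-intersect-two-literal-sets strategy by a requirement-set algorithm: every error and snippet is classified into a category ('ocr'/'primary'/'derivative') via one lookup table, the categories are concatenated into a single evidence stream, and one loop shrinks the set of unmet requirements {'ocr','primary','derivative'} until it is empty (early exit) or the stream ends.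
import Mathlib
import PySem

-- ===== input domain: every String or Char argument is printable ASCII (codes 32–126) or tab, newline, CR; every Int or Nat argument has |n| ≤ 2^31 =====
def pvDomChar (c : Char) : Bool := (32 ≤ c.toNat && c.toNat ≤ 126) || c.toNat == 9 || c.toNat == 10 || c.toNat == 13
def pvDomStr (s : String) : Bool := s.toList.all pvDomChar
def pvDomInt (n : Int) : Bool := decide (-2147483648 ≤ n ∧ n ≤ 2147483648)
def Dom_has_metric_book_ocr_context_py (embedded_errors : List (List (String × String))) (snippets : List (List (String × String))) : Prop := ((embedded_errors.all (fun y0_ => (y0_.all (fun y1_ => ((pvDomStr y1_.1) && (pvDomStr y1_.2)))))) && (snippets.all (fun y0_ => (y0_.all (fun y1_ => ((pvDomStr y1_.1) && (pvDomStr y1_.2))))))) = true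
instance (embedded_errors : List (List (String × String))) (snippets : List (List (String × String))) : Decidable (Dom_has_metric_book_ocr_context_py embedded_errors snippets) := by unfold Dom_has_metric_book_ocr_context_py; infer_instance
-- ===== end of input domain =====

-- One line: B replaces A's type-set-and-two-intersections strategy by a lookup-table
-- classification of all evidence into one stream plus a shrinking requirement set
-- (objective: alternative; no speed claim).

-- dict.get k [dflt] on the association-list representation (first match, exact for a Python dict)
def pvGet? (d : List (String × String)) (k : String) : Option String := d.lookup k
def pvGetD (d : List (String × String)) (k dflt : String) : String := (d.lookup k).getD dflt

-- ===== PORT A =====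
-- the two literal sets A intersects with
def pvPrimaryLits : List String := ["metric_book_birth_image", "metric_book_marriage", "revision_list"]
def pvDerivativeLits : List String := ["ocr_output_raw", "online_tree"]

def has_metric_book_ocr_context_py (embedded_errors : List (List (String × String))) (snippets : List (List (String × String))) : Bool :=
  let snippet_types : PySem.Set String :=
    PySem.Set.ofList (snippets.map (fun snippet => PySem.Str.lower (pvGetD snippet "type" "")))
  let has_primary_source : Bool := !(PySem.Set.inter snippet_types (PySem.Set.ofList pvPrimaryLits)).isEmpty
  let has_derivative_source : Bool := !(PySem.Set.inter snippet_types (PySem.Set.ofList pvDerivativeLits)).isEmpty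
  let has_ocr_error : Bool := embedded_errors.any (fun error => pvGet? error "type" == some "ocr_error")
  has_ocr_error && has_primary_source && has_derivative_source

-- ===== PORT B =====
-- module-level classification table _CATEGORY (a Python dict → association list)
def pvCatTable : List (String × String) :=
  [("metric_book_birth_image", "primary"), ("metric_book_marriage", "primary"),
   ("revision_list", "primary"), ("ocr_output_raw", "derivative"), ("online_tree", "derivative")]

-- the loop: 'for category in evidence: need.discard(category); if not need: return True'
-- (Python's need.discard(None) on a set of strings never removes anything → the 'none' branch keeps need)
def pvNeedLoop : List (Option String) → PySem.Set String → Bool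
  | [], _ => false
  | c :: rest, need =>
    let need' := match c with
      | some x => PySem.Set.discard need x
      | none => need
    if need'.isEmpty then true else pvNeedLoop rest need'

def has_metric_book_ocr_context_py_alt (embedded_errors : List (List (String × String))) (snippets : List (List (String × String))) : Bool :=
  let evidence : List (Option String) :=
    embedded_errors.map (fun error => if pvGet? error "type" == some "ocr_error" then some "ocr" else none)
      ++ snippets.map (fun snippet => pvCatTable.lookup (PySem.Str.lower (pvGetD snippet "type" "")))
  pvNeedLoop evidence (PySem.Set.ofList ["ocr", "primary", "derivative"])

-- ===== PRECONDITION & SPEC =====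
def Spec_has_metric_book_ocr_context_py (embedded_errors : List (List (String × String))) (snippets : List (List (String × String))) (out : Bool) : Prop := out = has_metric_book_ocr_context_py_alt embedded_errors snippets
instance (embedded_errors : List (List (String × String))) (snippets : List (List (String × String))) (out : Bool) : Decidable (Spec_has_metric_book_ocr_context_py embedded_errors snippets out) := by unfold Spec_has_metric_book_ocr_context_py; infer_instance

-- ===== CLAIM =====
def Claim_equal_has_metric_book_ocr_context_py : Prop := ∀ (embedded_errors : List (List (String × String))) (snippets : List (List (String × String))), Dom_has_metric_book_ocr_context_py embedded_errors snippets → Spec_has_metric_book_ocr_context_py embedded_errors snippets (has_metric_book_ocr_context_py embedded_errors snippets)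

-- ===== LEMMAS AND PROOFS =====

-- A's "bool(set(l) & set(t))" is "some element of l lies in t"
theorem pv_inter_nonempty (l t : List String) :
    (!(PySem.Set.inter (PySem.Set.ofList l) (PySem.Set.ofList t)).isEmpty)
      = l.any (fun x => t.contains x) := by
  rw [Bool.eq_iff_iff]
  simp only [Bool.not_eq_eq_eq_not, Bool.not_true, List.isEmpty_eq_false_iff_exists_mem,
    PySem.Set.mem_inter, PySem.Set.mem_ofList, List.any_eq_true, List.contains_iff_mem]

-- the classification table never yields "ocr" …
theorem pv_cat_ne_ocr (t : String) : ¬ (pvCatTable.lookup t = some "ocr") := by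
  simp only [pvCatTable, List.lookup]
  repeat' split
  all_goals simp

-- … and yields "primary" / "derivative" exactly on the corresponding literal lists
theorem pv_cat_primary (t : String) :
    pvCatTable.lookup t = some "primary" ↔ t ∈ pvPrimaryLits := by
  simp only [pvCatTable, pvPrimaryLits, List.lookup, List.mem_cons, List.not_mem_nil, or_false]
  repeat' split
  all_goals simp_all

theorem pv_cat_derivative (t : String) :
    pvCatTable.lookup t = some "derivative" ↔ t ∈ pvDerivativeLits := by
  simp only [pvCatTable, pvDerivativeLits, List.lookup, List.mem_cons, List.not_mem_nil, or_false]
  repeat' split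
  all_goals simp_all

-- the requirement loop succeeds iff every unmet requirement occurs in the stream
theorem pv_needLoop_eq (l : List (Option String)) (need : PySem.Set String)
    (hne : need ≠ []) :
    pvNeedLoop l need = need.all (fun x => l.contains (some x)) := by
  induction l generalizing need with
  | nil =>
    simp only [pvNeedLoop, List.contains_nil]
    cases need with
    | nil => exact absurd rfl hne
    | cons a s => simp
  | cons c rest ih =>
    simp only [pvNeedLoop]
    cases c with
    | none =>
      have h : (need.isEmpty) = false := by
        cases need with
        | nil => exact absurd rfl hne
        | cons a s => rfl
      rw [if_neg (by simp [h]), ih need hne]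
      rw [Bool.eq_iff_iff]
      simp [List.all_eq_true]
    | some k =>
      by_cases hE : (PySem.Set.discard need k).isEmpty
      · rw [if_pos hE]
        rw [List.isEmpty_iff] at hE
        -- need nonempty and discard k empties it: every element of need equals k
        have hall : ∀ x ∈ need, x = k := by
          intro x hx
          by_contra hxk
          have : x ∈ PySem.Set.discard need k := (PySem.Set.mem_discard _ _ _).mpr ⟨hx, hxk⟩
          simp [hE] at this
        symm
        simp only [List.all_eq_true]
        intro x hx
        simp [hall x hx]
      · rw [if_neg hE]
        have hne' : PySem.Set.discard need k ≠ [] := by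
          intro h; rw [h] at hE; exact hE rfl
        rw [ih _ hne']
        rw [Bool.eq_iff_iff]
        simp only [List.all_eq_true, PySem.Set.mem_discard, List.contains_cons,
          Bool.or_eq_true, beq_iff_eq, Option.some.injEq, and_imp]
        constructor
        · intro h x hx
          rcases eq_or_ne x k with rfl | hxk
          · exact Or.inl rfl
          · exact Or.inr (h x hx hxk)
        · intro h x hx hxk
          rcases h x hx with h' | h'
          · exact absurd h' hxk
          · exact h'

-- membership of each category in the combined evidence stream
theorem pv_evidence_ocr (ee ss : List (List (String × String))) :
    ((ee.map (fun error => if pvGet? error "type" == some "ocr_error" then some "ocr" else none)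
      ++ ss.map (fun snippet => pvCatTable.lookup (PySem.Str.lower (pvGetD snippet "type" "")))).contains
        (some "ocr"))
      = ee.any (fun error => pvGet? error "type" == some "ocr_error") := by
  rw [Bool.eq_iff_iff]
  simp only [List.contains_iff_mem, List.mem_append, List.mem_map, List.any_eq_true]
  constructor
  · rintro (⟨e, he, hc⟩ | ⟨s, _, hc⟩)
    · by_cases h : pvGet? e "type" == some "ocr_error"
      · exact ⟨e, he, h⟩
      · simp [h] at hc
    · exact absurd hc (pv_cat_ne_ocr _)
  · rintro ⟨e, he, h⟩
    exact Or.inl ⟨e, he, by simp [h]⟩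

theorem pv_evidence_cat (ee ss : List (List (String × String))) (lits : List String) (v : String)
    (hv : v ≠ "ocr")
    (hiff : ∀ t, pvCatTable.lookup t = some v ↔ t ∈ lits) :
    ((ee.map (fun error => if pvGet? error "type" == some "ocr_error" then some "ocr" else none)
      ++ ss.map (fun snippet => pvCatTable.lookup (PySem.Str.lower (pvGetD snippet "type" "")))).contains
        (some v))
      = ss.any (fun s => lits.contains (PySem.Str.lower (pvGetD s "type" ""))) := by
  rw [Bool.eq_iff_iff]
  simp only [List.contains_iff_mem, List.mem_append, List.mem_map, List.any_eq_true]
  constructor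
  · rintro (⟨e, _, hc⟩ | ⟨s, hs, hc⟩)
    · by_cases h : pvGet? e "type" == some "ocr_error" <;> simp [h, hv.symm] at hc
    · exact ⟨s, hs, by simpa [List.contains_iff_mem] using (hiff _).mp hc⟩
  · rintro ⟨s, hs, h⟩
    exact Or.inr ⟨s, hs, (hiff _).mpr (by simpa [List.contains_iff_mem] using h)⟩

-- ===== VERDICT =====
theorem has_metric_book_ocr_context_py_spec : Claim_equal_has_metric_book_ocr_context_py := by
  intro ee ss _
  unfold Spec_has_metric_book_ocr_context_py
  unfold has_metric_book_ocr_context_py has_metric_book_ocr_context_py_alt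
  rw [pv_needLoop_eq _ _ (by decide)]
  simp only [pv_inter_nonempty, List.any_map, Function.comp_def]
  rw [show (PySem.Set.ofList ["ocr", "primary", "derivative"]) = ["ocr", "primary", "derivative"] from rfl]
  simp only [List.all_cons, List.all_nil, Bool.and_true]
  rw [pv_evidence_ocr, pv_evidence_cat ee ss pvPrimaryLits "primary" (by decide) pv_cat_primary,
    pv_evidence_cat ee ss pvDerivativeLits "derivative" (by decide) pv_cat_derivative,
    Bool.and_assoc]
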